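-- pv_equiv track=rewrite | github.com/junwenX123/Projet-Theorie-spectrale-des-graphes | algo2.py | adj_to_lap
-- ===== SOURCE A (Python) =====
-- def adj_to_lap(mat):
--     n = len(mat)
--     lap = [[0 for i in range(0,n)] for i in range(0,n)]
--     deg = [0 for i in range(0,n)]
--     for i in range(0,n):
--         for j in range(0,n):
--             lap[i][j] = -mat[i][j]
--             deg[i] -= lap[i][j]
--     for i in range(0, n):
--         lap[i][i] = deg[i]
--     return lap
-- ===== SOURCE B (Python) =====
-- def _matvec(m, v):
--     return [sum(a * b for a, b in zip(row, v)) for row in m]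
--
--
-- def _diag(v):
--     n = len(v)
--     return [[v[i] if i == j else 0 for j in range(n)] for i in range(n)]
--
--
-- def _matsub(x, y):
--     return [[a - b for a, b in zip(xr, yr)] for xr, yr in zip(x, y)]
--
--
-- def adj_to_lap(mat):
--     # L = D - A0: degree matrix minus the adjacency with its diagonal zeroed,
--     # composed from generic linear-algebra helpers.
--     n = len(mat)
--     deg = _matvec(mat, [1] * n)
--     off = [[0 if i == j else mat[i][j] for j in range(n)] for i in range(n)]
--     return _matsub(_diag(deg), off)
-- ===== Notes on version B (the rewrite author's own statement) =====
-- stated objective: alternative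
-- what changed: Replaces A's in-place triple mutation (negate all entries into a zero matrix, accumulate degrees by subtraction, overwrite the diagonal) with a composition of generic linear-algebra helpers: deg = mat-vec product A*1, then L = matsub(diag(deg), A-with-zeroed-diagonal).
import Mathlib
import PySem

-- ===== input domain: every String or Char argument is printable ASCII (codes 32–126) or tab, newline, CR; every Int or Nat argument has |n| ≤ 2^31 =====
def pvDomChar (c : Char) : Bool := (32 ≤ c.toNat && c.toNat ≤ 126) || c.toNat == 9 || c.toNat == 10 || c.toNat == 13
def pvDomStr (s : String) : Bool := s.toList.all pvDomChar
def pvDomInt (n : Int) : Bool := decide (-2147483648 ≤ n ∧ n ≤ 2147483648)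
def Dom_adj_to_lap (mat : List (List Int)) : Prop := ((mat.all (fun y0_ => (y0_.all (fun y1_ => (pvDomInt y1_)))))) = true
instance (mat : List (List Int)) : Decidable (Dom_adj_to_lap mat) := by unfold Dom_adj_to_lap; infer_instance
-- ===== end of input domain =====

-- B replaces A's in-place triple mutation with a composition of generic linear-algebra
-- helpers: deg = mat·1 (mat-vec product), then L = matsub(diag(deg), A-with-zeroed-diagonal).

-- ===== PORT A =====
def adj_to_lap (mat : List (List Int)) : List (List Int) :=
  let n : Int := mat.length
  let lap : List (List Int) :=
    (PySem.List.pyRange 0 n 1).map (fun _ => (PySem.List.pyRange 0 n 1).map (fun _ => (0 : Int)))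
  let deg : List Int := (PySem.List.pyRange 0 n 1).map (fun _ => (0 : Int))
  let st :=
    (PySem.List.pyRange 0 n 1).foldl (fun (s : List (List Int) × List Int) i =>
      (PySem.List.pyRange 0 n 1).foldl (fun (s : List (List Int) × List Int) j =>
        -- lap[i][j] = -mat[i][j]
        let lap1 := PySem.List.pySetD s.1 i
          (PySem.List.pySetD (PySem.List.pyGetD s.1 i []) j
            (-(PySem.List.pyGetD (PySem.List.pyGetD mat i []) j 0)))
        -- deg[i] -= lap[i][j]
        let deg1 := PySem.List.pySetD s.2 i
          (PySem.List.pyGetD s.2 i 0 - PySem.List.pyGetD (PySem.List.pyGetD lap1 i []) j 0)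
        (lap1, deg1)) s) (lap, deg)
  -- for i in range(0, n): lap[i][i] = deg[i]
  (PySem.List.pyRange 0 n 1).foldl (fun lap i =>
    PySem.List.pySetD lap i
      (PySem.List.pySetD (PySem.List.pyGetD lap i []) i (PySem.List.pyGetD st.2 i 0))) st.1

-- ===== PORT B =====
-- [sum(a * b for a, b in zip(row, v)) for row in m]
def pvMatvec (m : List (List Int)) (v : List Int) : List Int :=
  m.map (fun row => ((row.zip v).map (fun p => p.1 * p.2)).sum)

-- [[v[i] if i == j else 0 for j in range(n)] for i in range(n)]  (i < n = len(v): index in range)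
def pvDiag (v : List Int) : List (List Int) :=
  (List.range v.length).map (fun i =>
    (List.range v.length).map (fun j => if i = j then v.getD i 0 else 0))

-- [[a - b for a, b in zip(xr, yr)] for xr, yr in zip(x, y)]
def pvMatsub (x y : List (List Int)) : List (List Int) :=
  (x.zip y).map (fun p => (p.1.zip p.2).map (fun q => q.1 - q.2))

def adj_to_lap_alt (mat : List (List Int)) : List (List Int) :=
  let n := mat.length
  let deg := pvMatvec mat (List.replicate n 1)
  -- [[0 if i == j else mat[i][j] for j in range(n)] for i in range(n)]  (indices in range on Pre_)
  let off := (List.range n).map (fun (i : Nat) =>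
    (List.range n).map (fun (j : Nat) =>
      if i = j then (0 : Int)
      else PySem.List.pyGetD (PySem.List.pyGetD mat (i : Int) []) ((j : Int)) 0))
  pvMatsub (pvDiag deg) off

-- ===== PRECONDITION & SPEC =====
-- Pre_ excludes ragged matrices with a row shorter than len(mat): there the Python A raises
-- IndexError on mat[i][j].
def Pre_adj_to_lap (mat : List (List Int)) : Prop :=
  ∀ row ∈ mat, mat.length ≤ row.length
instance (mat : List (List Int)) : Decidable (Pre_adj_to_lap mat) := by
  unfold Pre_adj_to_lap; infer_instance
def pvWitness_adj_to_lap : List (List Int) := [[0, 1], [1, 0]]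

def Spec_adj_to_lap (mat : List (List Int)) (out : List (List Int)) : Prop := out = adj_to_lap_alt mat
instance (mat : List (List Int)) (out : List (List Int)) : Decidable (Spec_adj_to_lap mat out) := by unfold Spec_adj_to_lap; infer_instance

-- ===== CLAIM (what is proved, stated in full; the proofs are below) =====
def Claim_equal_adj_to_lap : Prop := ∀ (mat : List (List Int)), Dom_adj_to_lap mat → Pre_adj_to_lap mat → Spec_adj_to_lap mat (adj_to_lap mat)

-- ===== LEMMAS AND PROOFS =====

-- entry mat[i][j] (getD form; in range for every index the ports use)
def aEnt (mat : List (List Int)) (i j : Nat) : Int := (mat.getD i []).getD j 0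

-- the inner-loop step of A's port, in Nat form (the shape simp-normalisation produces)
def inStep (mat : List (List Int)) (i : Nat) (s : List (List Int) × List Int) (j : Nat) :
    List (List Int) × List Int :=
  (s.1.set i ((s.1.getD i []).set j (-(mat.getD i []).getD j 0)),
   s.2.set i (s.2.getD i 0 -
     ((s.1.set i ((s.1.getD i []).set j (-(mat.getD i []).getD j 0))).getD i []).getD j 0))

def zRow (n : Nat) : List Int := (List.range n).map (fun _ => 0)

def mainFold (mat : List (List Int)) : List (List Int) × List Int :=
  (List.range mat.length).foldl (fun s i => (List.range mat.length).foldl (inStep mat i) s)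
    ((List.range mat.length).map (fun _ => zRow mat.length),
     (List.range mat.length).map (fun _ => (0 : Int)))

def diagStep (mat : List (List Int)) (x : List (List Int)) (y : Nat) : List (List Int) :=
  x.set y ((x.getD y []).set y ((mainFold mat).2.getD y 0))

-- row i of lap after the first m inner steps, starting from row `row`
def owRow (mat : List (List Int)) (i : Nat) (row : List Int) : Nat → List Int
  | 0 => row
  | m + 1 => (owRow mat i row m).set m (-(aEnt mat i m))

-- deg[i] after the first m inner steps, starting from value d
def accD (mat : List (List Int)) (i : Nat) (d : Int) : Nat → Int
  | 0 => d
  | m + 1 => accD mat i d m - (-(aEnt mat i m))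

def negRow (mat : List (List Int)) (n i : Nat) : List Int :=
  (List.range n).map (fun j => -(aEnt mat i j))

def dVal (mat : List (List Int)) (n i : Nat) : Int :=
  ((List.range n).map (fun j => aEnt mat i j)).sum

def finalRow (mat : List (List Int)) (n i : Nat) : List Int :=
  (List.range n).map (fun j => if i = j then dVal mat n i else -(aEnt mat i j))

theorem adj_to_lap_eq_fold (mat : List (List Int)) :
    adj_to_lap mat = (List.range mat.length).foldl (diagStep mat) (mainFold mat).1 := by
  simp only [adj_to_lap, PySem.List.pyRange_zero_nat, List.foldl_map, List.map_map,
    Function.comp_def, PySem.List.pyGetD_natCast, PySem.List.pySetD_natCast]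
  rfl

theorem owRow_length (mat : List (List Int)) (i : Nat) (row : List Int) (m : Nat) :
    (owRow mat i row m).length = row.length := by
  induction m with
  | zero => rfl
  | succ m ih => simp [owRow, ih]

theorem owRow_getElem (mat : List (List Int)) (i : Nat) (row : List Int) (m j : Nat)
    (hj : j < row.length) :
    (owRow mat i row m)[j]'(by rw [owRow_length]; exact hj) =
      if j < m then -(aEnt mat i j) else row[j] := by
  induction m with
  | zero => simp [owRow]
  | succ m ih =>
      simp only [owRow, List.getElem_set]
      rcases Nat.lt_trichotomy j m with h | h | h
      · rw [if_neg (by omega), ih, if_pos h, if_pos (by omega)]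
      · subst h; rw [if_pos rfl, if_pos (by omega)]
      · rw [if_neg (by omega), ih, if_neg (by omega), if_neg (by omega)]

theorem owRow_zRow (mat : List (List Int)) (n i : Nat) :
    owRow mat i (zRow n) n = negRow mat n i := by
  apply List.ext_getElem
  · rw [owRow_length]; simp [zRow, negRow]
  · intro j h1 h2
    have hj : j < n := by simpa [negRow] using h2
    rw [owRow_getElem mat i _ n j (by simpa [zRow] using hj), if_pos hj]
    simp [negRow]

theorem accD_eq (mat : List (List Int)) (i : Nat) (d : Int) (m : Nat) :
    accD mat i d m = d + ((List.range m).map (fun j => aEnt mat i j)).sum := by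
  induction m with
  | zero => simp [accD]
  | succ m ih => rw [accD, ih, List.range_succ]; simp; ring

theorem getD_set_self' {α : Type} (l : List α) (i : Nat) (a d : α) (h : i < l.length) :
    (l.set i a).getD i d = a := by
  rw [List.getD_eq_getElem _ _ (by simpa using h), List.getElem_set_self]

theorem set_map_range {α : Type} (f : Nat → α) (n m : Nat) (y : α) (_hm : m < n) :
    ((List.range n).map f).set m y =
      (List.range n).map (fun k => if k = m then y else f k) := by
  apply List.ext_getElem
  · simp
  · intro j h1 h2
    have hj : j < n := by simpa using h2
    simp only [List.getElem_set, List.getElem_map, List.getElem_range]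
    by_cases h : j = m
    · simp [h]
    · have h' : ¬ m = j := fun hh => h hh.symm
      simp [h, h']

-- the inner loop, characterised
theorem inner_loop (mat : List (List Int)) (i : Nat) (m : Nat)
    (L : List (List Int)) (D : List Int)
    (hiL : i < L.length) (hiD : i < D.length)
    (hm : m ≤ (L.getD i []).length) :
    (List.range m).foldl (inStep mat i) (L, D) =
      (L.set i (owRow mat i (L.getD i []) m), D.set i (accD mat i (D.getD i 0) m)) := by
  induction m with
  | zero =>
      simp only [List.range_zero, List.foldl_nil, owRow, accD]
      rw [List.getD_eq_getElem L [] hiL, List.set_getElem_self,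
          List.getD_eq_getElem D 0 hiD, List.set_getElem_self]
  | succ m ih =>
      rw [List.range_succ, List.foldl_append, ih (Nat.le_of_succ_le hm), List.foldl_cons,
        List.foldl_nil]
      have hrow : m < (owRow mat i (L.getD i []) m).length := by
        rw [owRow_length]; omega
      simp only [inStep, getD_set_self' _ _ _ _ hiL, getD_set_self' _ _ _ _ hiD, List.set_set]
      rw [getD_set_self' _ _ _ _ hrow]
      refine Prod.ext ?_ ?_ <;> simp [owRow, accD, aEnt]

-- the outer double loop, characterised
theorem outer_loop (mat : List (List Int)) (m : Nat) (hm : m ≤ mat.length) :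
    (List.range m).foldl
        (fun s i => (List.range mat.length).foldl (inStep mat i) s)
        ((List.range mat.length).map (fun _ => zRow mat.length),
         (List.range mat.length).map (fun _ => (0 : Int))) =
      ((List.range mat.length).map
         (fun r => if r < m then negRow mat mat.length r else zRow mat.length),
       (List.range mat.length).map
         (fun r => if r < m then dVal mat mat.length r else 0)) := by
  induction m with
  | zero => simp
  | succ m ih =>
      rw [List.range_succ, List.foldl_append, ih (by omega), List.foldl_cons, List.foldl_nil]
      have hmn : m < mat.length := by omega
      have hgL : ((List.range mat.length).map
          (fun r => if r < m then negRow mat mat.length r else zRow mat.length)).getD m [] =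
          zRow mat.length := by
        rw [List.getD_eq_getElem _ _ (by simpa using hmn)]; simp
      have hgD : ((List.range mat.length).map
          (fun r => if r < m then dVal mat mat.length r else 0)).getD m 0 = 0 := by
        rw [List.getD_eq_getElem _ _ (by simpa using hmn)]; simp
      rw [inner_loop mat m mat.length _ _ (by simpa using hmn) (by simpa using hmn)
            (by rw [hgL]; simp [zRow]),
          hgL, hgD, owRow_zRow, accD_eq, set_map_range _ _ _ _ hmn, set_map_range _ _ _ _ hmn]
      refine Prod.ext ?_ ?_ <;>
        · apply List.map_congr_left
          intro k hk
          by_cases h1 : k = m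
          · subst h1; simp [dVal]
          · have h2 : (k < m + 1) ↔ (k < m) := by omega
            simp [h1, h2]

theorem mainFold_eq (mat : List (List Int)) :
    mainFold mat = ((List.range mat.length).map (fun r => negRow mat mat.length r),
                    (List.range mat.length).map (fun r => dVal mat mat.length r)) := by
  unfold mainFold
  rw [outer_loop mat mat.length le_rfl]
  refine Prod.ext ?_ ?_ <;>
    · apply List.map_congr_left
      intro k hk
      have : k < mat.length := by simpa using hk
      simp [this]

theorem negRow_set_diag (mat : List (List Int)) (n i : Nat) (hi : i < n) :
    (negRow mat n i).set i (dVal mat n i) = finalRow mat n i := by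
  unfold negRow finalRow
  rw [set_map_range _ _ _ _ hi]
  apply List.map_congr_left
  intro k hk
  by_cases h : k = i
  · subst h; simp
  · have h' : ¬ (i = k) := fun hh => h hh.symm
    simp [h, h']

-- the diagonal loop, characterised
theorem diag_loop (mat : List (List Int)) (m : Nat) (hm : m ≤ mat.length) :
    (List.range m).foldl (diagStep mat)
        ((List.range mat.length).map (fun r => negRow mat mat.length r)) =
      (List.range mat.length).map
        (fun r => if r < m then finalRow mat mat.length r else negRow mat mat.length r) := by
  induction m with
  | zero =>
      simp only [List.range_zero, List.foldl_nil]
      apply List.map_congr_left; intro k hk; simp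
  | succ m ih =>
      rw [List.range_succ, List.foldl_append, ih (by omega), List.foldl_cons, List.foldl_nil]
      have hmn : m < mat.length := by omega
      have hgL : ((List.range mat.length).map
          (fun r => if r < m then finalRow mat mat.length r else negRow mat mat.length r)).getD
            m [] = negRow mat mat.length m := by
        rw [List.getD_eq_getElem _ _ (by simpa using hmn)]; simp
      have hgD : (mainFold mat).2.getD m 0 = dVal mat mat.length m := by
        rw [mainFold_eq]
        rw [List.getD_eq_getElem _ _ (by simpa using hmn)]; simp
      unfold diagStep
      rw [hgL, hgD, negRow_set_diag mat mat.length m hmn, set_map_range _ _ _ _ hmn]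
      apply List.map_congr_left
      intro k hk
      by_cases h1 : k = m
      · subst h1; simp
      · have h2 : (k < m + 1) ↔ (k < m) := by omega
        simp [h1, h2]

theorem adj_to_lap_char (mat : List (List Int)) :
    adj_to_lap mat = (List.range mat.length).map (fun r => finalRow mat mat.length r) := by
  rw [adj_to_lap_eq_fold,
      (congrArg Prod.fst (mainFold_eq mat) :
        (mainFold mat).1 = (List.range mat.length).map (fun r => negRow mat mat.length r)),
      diag_loop mat mat.length le_rfl]
  apply List.map_congr_left
  intro k hk
  have : k < mat.length := by simpa using hk
  simp [this]

-- zip with the all-ones vector sums the first n entries of the row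
theorem zip_ones_sum (row : List Int) (n : Nat) (h : n ≤ row.length) :
    ((row.zip (List.replicate n (1 : Int))).map (fun p => p.1 * p.2)).sum =
      ((List.range n).map (fun j => row.getD j 0)).sum := by
  congr 1
  apply List.ext_getElem
  · simp; omega
  · intro k h1 h2
    have hk : k < n := by simpa using h2
    simp only [List.getElem_map, List.getElem_zip, List.getElem_replicate, mul_one,
      List.getElem_range]
    rw [List.getD_eq_getElem _ _ (by omega)]

theorem adj_to_lap_alt_char (mat : List (List Int)) (hpre : Pre_adj_to_lap mat) :
    adj_to_lap_alt mat = (List.range mat.length).map (fun r => finalRow mat mat.length r) := by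
  have hdeg : pvMatvec mat (List.replicate mat.length 1) =
      (List.range mat.length).map (fun i => dVal mat mat.length i) := by
    apply List.ext_getElem
    · simp [pvMatvec]
    · intro i h1 h2
      have hi : i < mat.length := by simpa [pvMatvec] using h1
      have hlen : mat.length ≤ mat[i].length := hpre _ (List.getElem_mem hi)
      simp only [pvMatvec, List.getElem_map, List.getElem_range]
      rw [zip_ones_sum _ _ hlen]
      unfold dVal aEnt
      rw [List.getD_eq_getElem _ _ hi]
  have hoff : (List.range mat.length).map (fun (i : Nat) =>
      (List.range mat.length).map (fun (j : Nat) =>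
        if i = j then (0 : Int)
        else PySem.List.pyGetD (PySem.List.pyGetD mat (i : Int) []) ((j : Int)) 0)) =
      (List.range mat.length).map (fun i =>
        (List.range mat.length).map (fun j => if i = j then 0 else aEnt mat i j)) := by
    apply List.map_congr_left
    intro i hi
    apply List.map_congr_left
    intro j hj
    simp [PySem.List.pyGetD_natCast, aEnt]
  show pvMatsub _ _ = _
  rw [hdeg, hoff]
  unfold pvMatsub pvDiag
  simp only [List.length_map, List.length_range]
  apply List.ext_getElem
  · simp
  · intro i h1 h2
    have hi : i < mat.length := by simpa using h2
    simp only [List.getElem_map, List.getElem_zip, List.getElem_range]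
    apply List.ext_getElem
    · simp [finalRow]
    · intro j h3 h4
      have hj : j < mat.length := by simpa [finalRow] using h4
      have hdi : ((List.range mat.length).map
          (fun i => dVal mat mat.length i)).getD i 0 = dVal mat mat.length i := by
        rw [List.getD_eq_getElem _ _ (by simpa using hi)]; simp
      simp only [List.getElem_map, List.getElem_zip, List.getElem_range, finalRow, hdi]
      by_cases h : i = j
      · simp [h]
      · simp [h]

-- ===== VERDICT (by name: the statement is the Claim_ definition above) =====
theorem adj_to_lap_spec : Claim_equal_adj_to_lap := by
  intro mat _ hpre
  show adj_to_lap mat = adj_to_lap_alt mat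
  rw [adj_to_lap_char, adj_to_lap_alt_char mat hpre]
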